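-- pv_equiv track=rewrite | github.com/Crows12138/generative_agents_local_llm_with_godot | debug_system/llm_parser_study.py | suggest_new_patterns
-- ===== SOURCE A (Python) =====
-- from typing import Dict, List, Any, Match, Optional
--
-- def suggest_new_patterns(unmatched_outputs: List[str]) -> List[Dict[str, str]]:
--     """Suggest new patterns for unmatched outputs"""
--     suggestions = []
--
--     for output in unmatched_outputs:
--         # Simple heuristics for pattern suggestions
--         lower_output = output.lower()
--
--         if any(word in lower_output for word in ["wait", "stand", "watch", "observe"]):
--             suggestions.append({
--                 "pattern": r"(?:wait|stand|watch|observe)",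
--                 "action_type": "idle",
--                 "example": output
--             })
--
--         elif any(word in lower_output for word in ["think", "consider", "wonder"]):
--             suggestions.append({
--                 "pattern": r"(?:think|consider|wonder)",
--                 "action_type": "think",
--                 "example": output
--             })
--
--     return suggestions
-- ===== SOURCE B (Python) =====
-- # B: transposed, staged computation — keyword-major marking passes fill boolean
-- # masks (idle/think) per output, then one final pass assembles the suggestions;
-- # A instead classifies each output on the fly with an if/elif chain.
-- def suggest_new_patterns(unmatched_outputs):
--     lows = [o.lower() for o in unmatched_outputs]
--     n = len(lows)
--     idle = [False] * n
--     think = [False] * n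
--     for w in ["wait", "stand", "watch", "observe"]:
--         for i, low in enumerate(lows):
--             if w in low:
--                 idle[i] = True
--     for w in ["think", "consider", "wonder"]:
--         for i, low in enumerate(lows):
--             if w in low:
--                 think[i] = True
--     out = []
--     for i, o in enumerate(unmatched_outputs):
--         if idle[i]:
--             out.append({"pattern": r"(?:wait|stand|watch|observe)",
--                         "action_type": "idle", "example": o})
--         elif think[i]:
--             out.append({"pattern": r"(?:think|consider|wonder)",
--                         "action_type": "think", "example": o})
--     return out
-- ===== Notes on version B (the rewrite author's own statement) =====
-- stated objective: alternative
-- what changed: Transposed the iteration: keyword-major marking passes fill per-output boolean masks (idle/think) in staged loops, and a final pass assembles the suggestions from the masks, instead of A's per-output if/elif classification with short-circuiting any().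
import Mathlib
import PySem

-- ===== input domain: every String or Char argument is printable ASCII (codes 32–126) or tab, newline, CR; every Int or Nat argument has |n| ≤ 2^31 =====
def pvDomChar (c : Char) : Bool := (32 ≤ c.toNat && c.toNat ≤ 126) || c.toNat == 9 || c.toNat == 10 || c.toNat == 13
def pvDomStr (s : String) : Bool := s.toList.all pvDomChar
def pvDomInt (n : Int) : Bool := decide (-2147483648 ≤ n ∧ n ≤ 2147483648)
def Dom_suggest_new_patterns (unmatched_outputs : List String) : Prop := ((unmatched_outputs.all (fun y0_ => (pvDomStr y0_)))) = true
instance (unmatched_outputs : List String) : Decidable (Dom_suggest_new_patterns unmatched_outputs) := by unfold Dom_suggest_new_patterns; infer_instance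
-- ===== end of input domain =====

-- B transposes the iteration: keyword-major marking passes fill per-output boolean masks, then one final pass assembles the suggestions; objective: alternative, same cost.


-- ===== PORT A =====
def suggest_new_patterns (unmatched_outputs : List String) : List (List (String × String)) :=
  unmatched_outputs.foldl (fun suggestions output =>
    let lower_output := PySem.Str.lower output
    if (["wait", "stand", "watch", "observe"].any (fun word => PySem.Str.isIn word lower_output)) then
      suggestions ++ [[("pattern", "(?:wait|stand|watch|observe)"), ("action_type", "idle"),
                       ("example", output)]]
    else if (["think", "consider", "wonder"].any (fun word => PySem.Str.isIn word lower_output)) then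
      suggestions ++ [[("pattern", "(?:think|consider|wonder)"), ("action_type", "think"),
                       ("example", output)]]
    else suggestions) []

-- ===== PORT B =====
-- keyword lists of Source B
def pvIdleWords : List String := ["wait", "stand", "watch", "observe"]
def pvThinkWords : List String := ["think", "consider", "wonder"]

-- inner enumerate loop of one marking pass: set flag i when keyword w occurs in lows[i]
def pvMarkPass (w : String) : List Bool → List String → List Bool
  | b :: bs, low :: ls => (if PySem.Str.isIn w low then true else b) :: pvMarkPass w bs ls
  | _, _ => []

-- final pass of Source B: assemble suggestions from the two masks
def pvBuild : List Bool → List Bool → List String → List (List (String × String))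
  | i :: is', t :: ts, o :: os =>
    (if i then [[("pattern", "(?:wait|stand|watch|observe)"), ("action_type", "idle"),
                 ("example", o)]]
     else if t then [[("pattern", "(?:think|consider|wonder)"), ("action_type", "think"),
                      ("example", o)]]
     else []) ++ pvBuild is' ts os
  | _, _, _ => []

def suggest_new_patterns_alt (unmatched_outputs : List String) : List (List (String × String)) :=
  let lows := unmatched_outputs.map PySem.Str.lower
  let idle := pvIdleWords.foldl (fun f w => pvMarkPass w f lows) (List.replicate lows.length false)
  let think := pvThinkWords.foldl (fun f w => pvMarkPass w f lows) (List.replicate lows.length false)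
  pvBuild idle think unmatched_outputs

-- ===== PRECONDITION & SPEC =====
def Spec_suggest_new_patterns (unmatched_outputs : List String) (out : List (List (String × String))) : Prop := out = suggest_new_patterns_alt unmatched_outputs
instance (unmatched_outputs : List String) (out : List (List (String × String))) : Decidable (Spec_suggest_new_patterns unmatched_outputs out) := by unfold Spec_suggest_new_patterns; infer_instance

-- ===== CLAIM (what is proved, stated in full; the proofs are below) =====
def Claim_equal_suggest_new_patterns : Prop := ∀ (unmatched_outputs : List String), Dom_suggest_new_patterns unmatched_outputs → Spec_suggest_new_patterns unmatched_outputs (suggest_new_patterns unmatched_outputs)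

-- ===== LEMMAS AND PROOFS =====

-- canonical per-output classification, used only by the proofs
def pvOne (o : String) : List (List (String × String)) :=
  if pvIdleWords.any (fun w => PySem.Str.isIn w (PySem.Str.lower o)) then
    [[("pattern", "(?:wait|stand|watch|observe)"), ("action_type", "idle"), ("example", o)]]
  else if pvThinkWords.any (fun w => PySem.Str.isIn w (PySem.Str.lower o)) then
    [[("pattern", "(?:think|consider|wonder)"), ("action_type", "think"), ("example", o)]]
  else []

-- cumulative effect of marking passes for a whole keyword list
def pvMarkAll (ws : List String) : List Bool → List String → List Bool
  | b :: bs, l :: ls => (b || ws.any (fun w => PySem.Str.isIn w l)) :: pvMarkAll ws bs ls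
  | _, _ => []

lemma markPass_length (w : String) (flags : List Bool) (lows : List String) :
    (pvMarkPass w flags lows).length = min flags.length lows.length := by
  induction flags generalizing lows with
  | nil => cases lows <;> simp [pvMarkPass]
  | cons b bs ih => cases lows with
    | nil => simp [pvMarkPass]
    | cons l ls =>
        simp only [pvMarkPass, List.length_cons, ih]
        omega

lemma markAll_nil (flags : List Bool) (lows : List String) (h : flags.length = lows.length) :
    pvMarkAll [] flags lows = flags := by
  induction flags generalizing lows with
  | nil => cases lows <;> simp [pvMarkAll]
  | cons b bs ih => cases lows with
    | nil => simp at h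
    | cons l ls =>
      simp only [pvMarkAll, List.any_nil, Bool.or_false]
      exact congrArg _ (ih ls (by simpa using h))

lemma markAll_cons (w : String) (ws : List String) (flags : List Bool) (lows : List String) :
    pvMarkAll ws (pvMarkPass w flags lows) lows = pvMarkAll (w :: ws) flags lows := by
  induction flags generalizing lows with
  | nil => cases lows <;> simp [pvMarkPass, pvMarkAll]
  | cons b bs ih => cases lows with
    | nil => simp [pvMarkPass, pvMarkAll]
    | cons l ls =>
      simp only [pvMarkPass, pvMarkAll, List.any_cons, ih]
      congr 1
      cases PySem.Str.isIn w l <;> cases b <;> simp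

lemma fold_mark (ws : List String) (flags : List Bool) (lows : List String)
    (h : flags.length = lows.length) :
    ws.foldl (fun f w => pvMarkPass w f lows) flags = pvMarkAll ws flags lows := by
  induction ws generalizing flags with
  | nil => simpa using (markAll_nil flags lows h).symm
  | cons w ws ih =>
    rw [List.foldl_cons, ih (pvMarkPass w flags lows) (by simp [markPass_length, h]),
        markAll_cons]

lemma markAll_replicate (ws : List String) (ls : List String) :
    pvMarkAll ws (List.replicate ls.length false) ls
      = ls.map (fun l => ws.any (fun w => PySem.Str.isIn w l)) := by
  induction ls with
  | nil => simp [pvMarkAll]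
  | cons l ls ih => simp [pvMarkAll, List.replicate_succ, ih]

lemma build_maps (xs : List String) :
    pvBuild (xs.map (fun o => pvIdleWords.any (fun w => PySem.Str.isIn w (PySem.Str.lower o))))
            (xs.map (fun o => pvThinkWords.any (fun w => PySem.Str.isIn w (PySem.Str.lower o))))
            xs = xs.flatMap pvOne := by
  induction xs with
  | nil => simp [pvBuild]
  | cons x xs ih =>
    simp only [List.map_cons, pvBuild, List.flatMap_cons, ih, pvOne]

lemma alt_flatMap (xs : List String) : suggest_new_patterns_alt xs = xs.flatMap pvOne := by
  show pvBuild
    (pvIdleWords.foldl (fun f w => pvMarkPass w f (xs.map PySem.Str.lower))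
      (List.replicate (xs.map PySem.Str.lower).length false))
    (pvThinkWords.foldl (fun f w => pvMarkPass w f (xs.map PySem.Str.lower))
      (List.replicate (xs.map PySem.Str.lower).length false)) xs = xs.flatMap pvOne
  rw [fold_mark _ _ _ (by simp), fold_mark _ _ _ (by simp),
      markAll_replicate, markAll_replicate, List.map_map, List.map_map]
  exact build_maps xs

lemma suggest_step (acc : List (List (String × String))) (x : String) :
    (if (["wait", "stand", "watch", "observe"].any (fun word => PySem.Str.isIn word (PySem.Str.lower x))) then
       acc ++ [[("pattern", "(?:wait|stand|watch|observe)"), ("action_type", "idle"),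
                ("example", x)]]
     else if (["think", "consider", "wonder"].any (fun word => PySem.Str.isIn word (PySem.Str.lower x))) then
       acc ++ [[("pattern", "(?:think|consider|wonder)"), ("action_type", "think"),
                ("example", x)]]
     else acc)
    = acc ++ pvOne x := by
  unfold pvOne pvIdleWords pvThinkWords
  split_ifs <;> simp_all

lemma suggest_aux (xs : List String) (acc : List (List (String × String))) :
    xs.foldl (fun suggestions output =>
      let lower_output := PySem.Str.lower output
      if (["wait", "stand", "watch", "observe"].any (fun word => PySem.Str.isIn word lower_output)) then
        suggestions ++ [[("pattern", "(?:wait|stand|watch|observe)"), ("action_type", "idle"),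
                         ("example", output)]]
      else if (["think", "consider", "wonder"].any (fun word => PySem.Str.isIn word lower_output)) then
        suggestions ++ [[("pattern", "(?:think|consider|wonder)"), ("action_type", "think"),
                         ("example", output)]]
      else suggestions) acc = acc ++ xs.flatMap pvOne := by
  induction xs generalizing acc with
  | nil => simp
  | cons x xs ih =>
    rw [List.foldl_cons]
    show List.foldl _ (if _ then acc ++ _ else if _ then acc ++ _ else acc) xs = _
    rw [suggest_step acc x, ih, List.flatMap_cons, List.append_assoc]

-- ===== VERDICT (by name: the statement is the Claim_ definition above) =====
theorem suggest_new_patterns_spec : Claim_equal_suggest_new_patterns := by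
  intro xs _
  show suggest_new_patterns xs = suggest_new_patterns_alt xs
  unfold suggest_new_patterns
  rw [suggest_aux xs [], List.nil_append, alt_flatMap]
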